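-- pv_equiv track=rewrite | github.com/yijiangh/bar_joint_rhino_design_workflow | scripts/core/bar_action.py | canonical_rb_name
-- ===== SOURCE A (Python) =====
-- ACTIVE_RB_BAR_PREFIX = "active_bar_"
--
-- ACTIVE_RB_JOINT_PREFIX = "active_joint_"
--
-- ENV_RB_BAR_PREFIX = "env_bar_"
--
-- ENV_RB_JOINT_PREFIX = "env_joint_"
--
-- CANONICAL_BAR_PREFIX = "bar_"
--
-- CANONICAL_JOINT_PREFIX = "joint_"
--
-- def canonical_rb_name(name: str) -> str:
--     """Strip the upstream `active_`/`env_` prefix to produce a state-independent name.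
--
--     ``active_bar_B6`` / ``env_bar_B6`` -> ``bar_B6``
--     ``active_joint_J3-6_male`` / ``env_joint_J3-6_male`` -> ``joint_J3-6_male``
--
--     Anything else (e.g. ``AssemblyLeftArmToolBody``) is returned unchanged.
--     Idempotent.
--     """
--     for p in (ACTIVE_RB_BAR_PREFIX, ENV_RB_BAR_PREFIX):
--         if name.startswith(p):
--             return CANONICAL_BAR_PREFIX + name[len(p):]
--     for p in (ACTIVE_RB_JOINT_PREFIX, ENV_RB_JOINT_PREFIX):
--         if name.startswith(p):
--             return CANONICAL_JOINT_PREFIX + name[len(p):]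
--     return name
-- ===== SOURCE B (Python) =====
-- def canonical_rb_name(name: str) -> str:
--     """Strip the upstream `active_`/`env_` prefix to produce a state-independent name.
--
--     The canonical prefix A would prepend ("bar_"/"joint_") is exactly the
--     type prefix already present in the remainder, so no reconstruction is
--     needed: strip the state prefix and keep the remainder iff it is a
--     bar_/joint_ name.
--     """
--     for prefix in ("active_", "env_"):
--         if name.startswith(prefix):
--             rest = name[len(prefix):]
--             if rest.startswith(("bar_", "joint_")):
--                 return rest
--             break
--     return name
-- ===== Notes on version B (the rewrite author's own statement) =====
-- stated objective: simpler
-- what changed: Instead of four full-prefix tests each rebuilding the result by concatenating a canonical prefix onto a slice, B strips the state prefix ('active_'/'env_') once and returns the remainder unchanged when it already carries a 'bar_'/'joint_' type prefix, so no string is reconstructed.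
import Mathlib
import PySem

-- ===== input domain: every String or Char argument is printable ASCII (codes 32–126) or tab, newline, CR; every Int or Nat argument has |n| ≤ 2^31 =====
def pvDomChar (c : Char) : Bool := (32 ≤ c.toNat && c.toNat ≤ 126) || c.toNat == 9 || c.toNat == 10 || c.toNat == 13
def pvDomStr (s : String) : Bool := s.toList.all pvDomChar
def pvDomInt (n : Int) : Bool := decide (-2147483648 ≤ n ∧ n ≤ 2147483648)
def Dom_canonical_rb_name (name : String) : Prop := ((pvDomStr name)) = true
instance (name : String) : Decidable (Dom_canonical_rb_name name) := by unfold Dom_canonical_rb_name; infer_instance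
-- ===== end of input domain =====

-- B strips the state prefix ('active_'/'env_') once and keeps the remainder when it already carries
-- its 'bar_'/'joint_' type prefix, instead of testing four full prefixes and rebuilding the result
-- by concatenation (objective: simpler).

-- ===== PORT A =====
-- A tests the four full prefixes in order and prepends the canonical prefix to the slice after it.
def canonical_rb_name (name : String) : String :=
  let cs := name.toList
  if PySem.Chars.startswith cs "active_bar_".toList then
    String.ofList ("bar_".toList ++ PySem.List.slice cs (some ((11 : Nat) : Int)) none)
  else if PySem.Chars.startswith cs "env_bar_".toList then
    String.ofList ("bar_".toList ++ PySem.List.slice cs (some ((8 : Nat) : Int)) none)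
  else if PySem.Chars.startswith cs "active_joint_".toList then
    String.ofList ("joint_".toList ++ PySem.List.slice cs (some ((13 : Nat) : Int)) none)
  else if PySem.Chars.startswith cs "env_joint_".toList then
    String.ofList ("joint_".toList ++ PySem.List.slice cs (some ((10 : Nat) : Int)) none)
  else name

-- ===== PORT B =====
-- the loop body of Source B for one state prefix of length k: keep the remainder iff it is a bar_/joint_ name
def pvRestAfter (name : String) (k : Nat) : String :=
  let rest := PySem.List.slice name.toList (some ((k : Nat) : Int)) none
  if PySem.Chars.startswith rest "bar_".toList || PySem.Chars.startswith rest "joint_".toList then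
    String.ofList rest
  else name

def canonical_rb_name_alt (name : String) : String :=
  let cs := name.toList
  if PySem.Chars.startswith cs "active_".toList then pvRestAfter name 7
  else if PySem.Chars.startswith cs "env_".toList then pvRestAfter name 4
  else name

-- ===== PRECONDITION & SPEC =====
def Spec_canonical_rb_name (name : String) (out : String) : Prop := out = canonical_rb_name_alt name
instance (name : String) (out : String) : Decidable (Spec_canonical_rb_name name out) := by unfold Spec_canonical_rb_name; infer_instance

-- ===== CLAIM (what is proved, stated in full; the proofs are below) =====
def Claim_equal_canonical_rb_name : Prop := ∀ (name : String), Dom_canonical_rb_name name → Spec_canonical_rb_name name (canonical_rb_name name)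

-- ===== LEMMAS AND PROOFS =====

-- the state+type prefix splits: p = st ++ ty, so stripping p and re-prepending ty = stripping st
theorem pv_hit (st ty t : List Char) (cs : List Char) (ht : (st ++ ty) ++ t = cs) :
    String.ofList (ty ++ List.drop (st ++ ty).length cs) = String.ofList (List.drop st.length cs) := by
  subst ht
  rw [List.drop_left, List.append_assoc, List.drop_left]

theorem pv_join (p q cs : List Char) (hp : p <+: cs) (hq : q <+: List.drop p.length cs) :
    (p ++ q) <+: cs := by
  obtain ⟨r, rfl⟩ := hp
  rw [List.drop_left] at hq
  obtain ⟨u, rfl⟩ := hq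
  exact ⟨u, by rw [List.append_assoc]⟩

theorem pv_main (name : String) : canonical_rb_name name = canonical_rb_name_alt name := by
  simp only [canonical_rb_name, canonical_rb_name_alt, pvRestAfter,
    PySem.List.slice_from_natCast, Bool.or_eq_true, PySem.Chars.startswith_iff]
  by_cases h1 : "active_bar_".toList <+: name.toList
  · obtain ⟨t, ht⟩ := h1
    have hsplit : ("active_".toList ++ "bar_".toList) ++ t = name.toList := ht
    have hA : "active_".toList <+: name.toList := ⟨"bar_".toList ++ t, by rw [← hsplit, List.append_assoc]⟩
    have hB : "bar_".toList <+: List.drop 7 name.toList :=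
      ⟨t, by rw [← hsplit, List.append_assoc]; exact (List.drop_left' (by decide)).symm⟩
    rw [if_pos ⟨t, ht⟩, if_pos hA, if_pos (Or.inl hB)]
    exact pv_hit "active_".toList "bar_".toList t name.toList hsplit
  · by_cases h2 : "env_bar_".toList <+: name.toList
    · obtain ⟨t, ht⟩ := h2
      have hsplit : ("env_".toList ++ "bar_".toList) ++ t = name.toList := ht
      have hnA : ¬ "active_".toList <+: name.toList := by
        intro h
        have := List.prefix_of_prefix_length_le h ⟨t, ht⟩ (by decide)
        revert this; decide
      have hE : "env_".toList <+: name.toList := ⟨"bar_".toList ++ t, by rw [← hsplit, List.append_assoc]⟩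
      have hB : "bar_".toList <+: List.drop 4 name.toList :=
        ⟨t, by rw [← hsplit, List.append_assoc]; exact (List.drop_left' (by decide)).symm⟩
      rw [if_neg h1, if_pos ⟨t, ht⟩, if_neg hnA, if_pos hE, if_pos (Or.inl hB)]
      exact pv_hit "env_".toList "bar_".toList t name.toList hsplit
    · by_cases h3 : "active_joint_".toList <+: name.toList
      · obtain ⟨t, ht⟩ := h3
        have hsplit : ("active_".toList ++ "joint_".toList) ++ t = name.toList := ht
        have hA : "active_".toList <+: name.toList := ⟨"joint_".toList ++ t, by rw [← hsplit, List.append_assoc]⟩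
        have hB : "joint_".toList <+: List.drop 7 name.toList :=
          ⟨t, by rw [← hsplit, List.append_assoc]; exact (List.drop_left' (by decide)).symm⟩
        rw [if_neg h1, if_neg h2, if_pos ⟨t, ht⟩, if_pos hA, if_pos (Or.inr hB)]
        exact pv_hit "active_".toList "joint_".toList t name.toList hsplit
      · by_cases h4 : "env_joint_".toList <+: name.toList
        · obtain ⟨t, ht⟩ := h4
          have hsplit : ("env_".toList ++ "joint_".toList) ++ t = name.toList := ht
          have hnA : ¬ "active_".toList <+: name.toList := by
            intro h
            have := List.prefix_of_prefix_length_le h ⟨t, ht⟩ (by decide)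
            revert this; decide
          have hE : "env_".toList <+: name.toList := ⟨"joint_".toList ++ t, by rw [← hsplit, List.append_assoc]⟩
          have hB : "joint_".toList <+: List.drop 4 name.toList :=
            ⟨t, by rw [← hsplit, List.append_assoc]; exact (List.drop_left' (by decide)).symm⟩
          rw [if_neg h1, if_neg h2, if_neg h3, if_pos ⟨t, ht⟩, if_neg hnA, if_pos hE, if_pos (Or.inr hB)]
          exact pv_hit "env_".toList "joint_".toList t name.toList hsplit
        · rw [if_neg h1, if_neg h2, if_neg h3, if_neg h4]
          by_cases hA : "active_".toList <+: name.toList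
          · have hni : ¬ ("bar_".toList <+: List.drop 7 name.toList ∨
                "joint_".toList <+: List.drop 7 name.toList) := by
              rintro (hb | hj)
              · exact h1 (pv_join "active_".toList "bar_".toList name.toList hA hb)
              · exact h3 (pv_join "active_".toList "joint_".toList name.toList hA hj)
            rw [if_pos hA, if_neg hni]
          · by_cases hE : "env_".toList <+: name.toList
            · have hni : ¬ ("bar_".toList <+: List.drop 4 name.toList ∨
                  "joint_".toList <+: List.drop 4 name.toList) := by
                rintro (hb | hj)
                · exact h2 (pv_join "env_".toList "bar_".toList name.toList hE hb)
                · exact h4 (pv_join "env_".toList "joint_".toList name.toList hE hj)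
              rw [if_neg hA, if_pos hE, if_neg hni]
            · rw [if_neg hA, if_neg hE]

-- ===== VERDICT (by name: the statement is the Claim_ definition above) =====
theorem canonical_rb_name_spec : Claim_equal_canonical_rb_name := by
  intro name _
  unfold Spec_canonical_rb_name
  exact pv_main name
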